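-- pv_equiv track=rewrite | github.com/bro256/ProofOfWorkDemo | main.py | count_leading_zeros_hex
-- ===== SOURCE A (Python) =====
-- def count_leading_zeros_hex(hex_string):
--     count = 0
--     for char in hex_string:
--         if char == '0':
--             count +=1
--         else:
--             break
--     return count
-- ===== SOURCE B (Python) =====
-- def count_leading_zeros_hex(hex_string):
--     return len(hex_string) - len(hex_string.lstrip('0'))
-- ===== Notes on version B (the rewrite author's own statement) =====
-- stated objective: idiomatic
-- what changed: Replaces the explicit char-by-char counting loop with a single expression: the leading-zero count is the length difference between the string and the string with its leading zeros stripped.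
import Mathlib
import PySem

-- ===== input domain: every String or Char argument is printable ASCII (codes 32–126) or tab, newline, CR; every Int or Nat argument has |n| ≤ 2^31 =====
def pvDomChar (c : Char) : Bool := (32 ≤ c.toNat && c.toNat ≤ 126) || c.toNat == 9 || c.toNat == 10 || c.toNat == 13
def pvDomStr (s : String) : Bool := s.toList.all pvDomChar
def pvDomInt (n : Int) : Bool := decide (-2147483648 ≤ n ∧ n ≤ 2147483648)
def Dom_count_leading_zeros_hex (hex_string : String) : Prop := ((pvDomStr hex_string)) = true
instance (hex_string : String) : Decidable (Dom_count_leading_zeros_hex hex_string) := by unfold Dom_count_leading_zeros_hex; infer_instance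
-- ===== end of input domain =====

-- B replaces A's char-by-char counting loop by a single length difference with lstrip('0').
-- ===== PORT A =====
-- the for-loop with break: count '0' chars until the first non-'0', then stop
def pvLoopA : List Char → Int → Int
  | [], count => count
  | ch :: rest, count => if ch = '0' then pvLoopA rest (count + 1) else count

def count_leading_zeros_hex (hex_string : String) : Int :=
  pvLoopA hex_string.toList 0

-- ===== PORT B =====
-- hand port of str.lstrip('0'): drop the longest prefix of '0' characters (exact)
def count_leading_zeros_hex_alt (hex_string : String) : Int :=
  (hex_string.toList.length : Int) - ((hex_string.toList.dropWhile (· == '0')).length : Int)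

-- ===== PRECONDITION & SPEC =====
def Spec_count_leading_zeros_hex (hex_string : String) (out : Int) : Prop := out = count_leading_zeros_hex_alt hex_string
instance (hex_string : String) (out : Int) : Decidable (Spec_count_leading_zeros_hex hex_string out) := by unfold Spec_count_leading_zeros_hex; infer_instance

-- ===== CLAIM (what is proved, stated in full; the proofs are below) =====
def Claim_equal_count_leading_zeros_hex : Prop := ∀ (hex_string : String), Dom_count_leading_zeros_hex hex_string → Spec_count_leading_zeros_hex hex_string (count_leading_zeros_hex hex_string)

-- ===== LEMMAS AND PROOFS =====

-- ===== VERDICT (by name: the statement is the Claim_ definition above) =====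
-- loop invariant: the break-loop returns the accumulator plus the length of the dropped '0' prefix
theorem pvLoopA_eq (l : List Char) (c : Int) :
    pvLoopA l c = c + ((l.length : Int) - ((l.dropWhile (· == '0')).length : Int)) := by
  induction l generalizing c with
  | nil => simp [pvLoopA]
  | cons ch rest ih =>
    by_cases h : ch = '0'
    · simp [pvLoopA, h, List.dropWhile, ih]
      have hle : (rest.dropWhile (· == '0')).length ≤ rest.length := List.length_dropWhile_le _ _
      omega
    · have h' : (ch == '0') = false := by simp [h]
      simp [pvLoopA, h, List.dropWhile, h']

theorem count_leading_zeros_hex_spec : Claim_equal_count_leading_zeros_hex := by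
  intro s _
  unfold Spec_count_leading_zeros_hex count_leading_zeros_hex count_leading_zeros_hex_alt
  rw [pvLoopA_eq]
  ring
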